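-- pv_equiv track=rewrite | github.com/hariharanragothaman/algoFlow | strings/can_convert_string_to_another_string.py | can_convert
-- ===== SOURCE A (Python) =====
-- def can_convert(s1, s2):
--     """Convert 2 strings of same length by doing zero or more conversions"""
--     if s1 == s2:
--         return True
--     dp = {}
--     for i, j in zip(s1, s2):
--         if dp.setdefault(i, j) != j:
--             return False
--     return len(set(s2)) < 26
-- ===== SOURCE B (Python) =====
-- def can_convert(s1, s2):
--     if s1 == s2:
--         return True
--     pairs = list(zip(s1, s2))
--     for c in {a for a, _ in pairs}:
--         if len({b for a, b in pairs if a == c}) > 1: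
--             return False
--     return len(set(s2)) < 26
-- ===== Notes on version B (the rewrite author's own statement) =====
-- stated objective: alternative
-- what changed: Replaces A's single incremental pass with a dict and early exit by a group-by algorithm: for each distinct source character it gathers the set of all characters it maps to and rejects if any group has more than one target (nested per-key scans instead of one stateful pass).
import Mathlib
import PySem

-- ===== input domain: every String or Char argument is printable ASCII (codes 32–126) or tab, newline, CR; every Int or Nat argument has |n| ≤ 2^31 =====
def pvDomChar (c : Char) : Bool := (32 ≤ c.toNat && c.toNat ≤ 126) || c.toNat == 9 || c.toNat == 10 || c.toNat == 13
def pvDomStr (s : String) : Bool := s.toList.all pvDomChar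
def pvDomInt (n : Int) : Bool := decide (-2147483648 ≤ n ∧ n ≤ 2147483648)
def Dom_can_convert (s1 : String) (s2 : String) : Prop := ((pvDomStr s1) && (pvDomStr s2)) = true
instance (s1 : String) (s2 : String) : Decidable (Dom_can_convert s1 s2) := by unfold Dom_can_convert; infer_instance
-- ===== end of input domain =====

-- B replaces A's single stateful dict pass (early exit) by a group-by algorithm: per distinct
-- source character it gathers the set of its targets and rejects any group of size > 1 (alternative).

-- ===== PORT A =====
-- the for-loop over zip(s1, s2) with dict dp and early 'return False'
def canConvertLoop (s2 : String) (dp : PySem.Dict Char Char) : List (Char × Char) → Bool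
  | [] => decide ((PySem.Set.ofList s2.toList).length < 26)
  | (i, j) :: rest =>
    -- dp.setdefault(i, j) returns dp[i] if present else j (and inserts j)
    let v : Char := (dp.get? i).getD j
    if v ≠ j then false
    else canConvertLoop s2 (dp.setdefault i j) rest

def can_convert (s1 : String) (s2 : String) : Bool :=
  if s1 == s2 then true
  else canConvertLoop s2 PySem.Dict.empty (s1.toList.zip s2.toList)

-- ===== PORT B =====
-- group-by: for each distinct source char c, the set of targets {b | (a,b) in pairs, a == c}
def can_convert_alt (s1 : String) (s2 : String) : Bool :=
  if s1 == s2 then true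
  else
    let pairs : List (Char × Char) := s1.toList.zip s2.toList
    let keys : PySem.Set Char := PySem.Set.ofList (pairs.map Prod.fst)
    if keys.all (fun c =>
        !(decide ((PySem.Set.ofList ((pairs.filter (fun p => p.1 == c)).map Prod.snd)).length > 1)))
    then decide ((PySem.Set.ofList s2.toList).length < 26)
    else false

-- ===== PRECONDITION & SPEC =====
def Spec_can_convert (s1 : String) (s2 : String) (out : Bool) : Prop := out = can_convert_alt s1 s2
instance (s1 : String) (s2 : String) (out : Bool) : Decidable (Spec_can_convert s1 s2 out) := by unfold Spec_can_convert; infer_instance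

-- ===== CLAIM (what is proved, stated in full; the proofs are below) =====
def Claim_equal_can_convert : Prop := ∀ (s1 : String) (s2 : String), Dom_can_convert s1 s2 → Spec_can_convert s1 s2 (can_convert s1 s2)

-- ===== LEMMAS AND PROOFS =====

-- the pair list describes a (partial) function: equal keys force equal values
def Functional (l : List (Char × Char)) : Prop :=
  ∀ p ∈ l, ∀ q ∈ l, p.1 = q.1 → p.2 = q.2

-- the value the A-loop effectively compares p.2 against: dp entry, else first value for that key in l
def lookFn (dp : PySem.Dict Char Char) (l : List (Char × Char)) (c : Char) : Option Char :=
  (dp.get? c).orElse (fun _ => (l.find? (fun q => q.1 == c)).map Prod.snd)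

def okFrom (dp : PySem.Dict Char Char) (l : List (Char × Char)) : Bool :=
  l.all (fun p => lookFn dp l p.1 == some p.2)

lemma lookFn_cons_of_some (dp : PySem.Dict Char Char) (i j v : Char) (rest : List (Char × Char))
    (h : dp.get? i = some v) (c : Char) :
    lookFn dp ((i, j) :: rest) c = lookFn dp rest c := by
  by_cases hc : c = i
  · subst hc; simp [lookFn, h]
  · have : (i == c) = false := by simp [Ne.symm hc]
    simp [lookFn, List.find?, this]

lemma lookFn_cons_insert (dp : PySem.Dict Char Char) (i j : Char) (rest : List (Char × Char))
    (h : dp.get? i = none) (c : Char) :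
    lookFn dp ((i, j) :: rest) c = lookFn (dp.insert i j) rest c := by
  by_cases hc : c = i
  · subst hc
    simp [lookFn, h, List.find?, PySem.Dict.get?_insert_self]
  · have : (i == c) = false := by simp [Ne.symm hc]
    simp [lookFn, List.find?, this, PySem.Dict.get?_insert_of_ne dp j hc]

lemma okFrom_cons_some (dp : PySem.Dict Char Char) (i j : Char) (rest : List (Char × Char))
    (h : dp.get? i = some j) :
    okFrom dp ((i, j) :: rest) = okFrom dp rest := by
  unfold okFrom
  have hf : (fun p : Char × Char => lookFn dp ((i, j) :: rest) p.1 == some p.2)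
      = (fun p : Char × Char => lookFn dp rest p.1 == some p.2) :=
    funext fun p => by rw [lookFn_cons_of_some dp i j j rest h]
  rw [List.all_cons, hf]
  have hhead : lookFn dp ((i, j) :: rest) i = some j := by simp [lookFn, h]
  simp [hhead]

lemma okFrom_cons_insert (dp : PySem.Dict Char Char) (i j : Char) (rest : List (Char × Char))
    (h : dp.get? i = none) :
    okFrom dp ((i, j) :: rest) = okFrom (dp.insert i j) rest := by
  unfold okFrom
  have hf : (fun p : Char × Char => lookFn dp ((i, j) :: rest) p.1 == some p.2)
      = (fun p : Char × Char => lookFn (dp.insert i j) rest p.1 == some p.2) :=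
    funext fun p => by rw [lookFn_cons_insert dp i j rest h]
  rw [List.all_cons, hf]
  have hhead : lookFn dp ((i, j) :: rest) i = some j := by
    simp [lookFn, h, List.find?]
  simp [hhead]

lemma loop_spec (l : List (Char × Char)) (dp : PySem.Dict Char Char) (s2 : String) :
    canConvertLoop s2 dp l =
      if okFrom dp l then decide ((PySem.Set.ofList s2.toList).length < 26) else false := by
  induction l generalizing dp with
  | nil => simp [canConvertLoop, okFrom]
  | cons p rest ih =>
    obtain ⟨i, j⟩ := p
    rw [canConvertLoop]
    cases h : dp.get? i with
    | some v =>
      have hc : dp.contains i = true := by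
        cases hcc : dp.contains i
        · rw [(PySem.Dict.get?_eq_none_iff_contains dp i).mpr hcc] at h; cases h
        · rfl
      by_cases hv : v = j
      · subst hv
        simp only [Option.getD_some, ne_eq, not_true_eq_false, if_false,
          PySem.Dict.setdefault_of_contains dp v hc, ih, okFrom_cons_some dp i v rest h]
      · have hlook : lookFn dp ((i, j) :: rest) i = some v := by simp [lookFn, h]
        have hok : okFrom dp ((i, j) :: rest) = false := by
          unfold okFrom
          rw [List.all_cons, hlook]
          simp [hv]
        simp [hv, hok]
    | none =>
      have hc : dp.contains i = false := (PySem.Dict.get?_eq_none_iff_contains dp i).mp h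
      simp only [Option.getD_none, ne_eq, not_true_eq_false, if_false,
        PySem.Dict.setdefault_of_not_contains dp j hc, ih, okFrom_cons_insert dp i j rest h]

-- a Set.ofList keeps exactly the distinct members, so its length is the toFinset card
lemma length_ofList_eq_card {a : Type} [DecidableEq a] (xs : List a) :
    (PySem.Set.ofList xs).length = xs.toFinset.card := by
  have hn : (PySem.Set.ofList xs).Nodup := PySem.Set.nodup_ofList xs
  rw [← List.toFinset_card_of_nodup hn]
  congr 1
  apply Finset.ext
  intro x
  simp [List.mem_toFinset, PySem.Set.mem_ofList]

-- A's loop over the empty dict succeeds iff the pair list is functional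
lemma okFrom_empty_iff (l : List (Char × Char)) :
    okFrom PySem.Dict.empty l = true ↔ Functional l := by
  have hlook : ∀ c : Char, lookFn PySem.Dict.empty l c
      = (l.find? (fun q => q.1 == c)).map Prod.snd := by
    intro c; simp [lookFn, PySem.Dict.get?_empty]
  simp only [okFrom, List.all_eq_true, beq_iff_eq]
  constructor
  · intro hok p hp q hq hkey
    have h1 := hok p hp
    have h2 := hok q hq
    rw [hlook] at h1 h2
    rw [hkey] at h1
    rw [h1] at h2
    simpa using h2
  · intro hfun p hp
    have hsome : (l.find? (fun q => q.1 == p.1)).isSome := by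
      rw [List.find?_isSome]; exact ⟨p, hp, by simp⟩
    obtain ⟨r, hr⟩ := Option.isSome_iff_exists.mp hsome
    have hrmem : r ∈ l := List.mem_of_find?_eq_some hr
    have hrkey : r.1 = p.1 := by simpa using List.find?_some hr
    have : r.2 = p.2 := hfun r hrmem p hp hrkey
    rw [hlook, hr, Option.map_some, this]

-- B's per-key group check succeeds iff the pair list is functional
lemma groups_iff (l : List (Char × Char)) :
    ((PySem.Set.ofList (l.map Prod.fst)).all (fun c =>
        !(decide ((PySem.Set.ofList ((l.filter (fun p => p.1 == c)).map Prod.snd)).length > 1)))) = true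
      ↔ Functional l := by
  simp only [List.all_eq_true, Bool.not_eq_true', decide_eq_false_iff_not, not_lt]
  have hmem : ∀ (c : Char) (b : Char),
      b ∈ (l.filter (fun p => p.1 == c)).map Prod.snd ↔ (c, b) ∈ l := by
    intro c b
    simp only [List.mem_map, List.mem_filter, beq_iff_eq]
    constructor
    · rintro ⟨p, ⟨hp, hk⟩, hb⟩
      have : p = (c, b) := by cases p; simp_all
      rwa [this] at hp
    · intro h; exact ⟨(c, b), ⟨h, rfl⟩, rfl⟩
  have hsize : ∀ c : Char,
      (PySem.Set.ofList ((l.filter (fun p => p.1 == c)).map Prod.snd)).length ≤ 1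
        ↔ ∀ b b', (c, b) ∈ l → (c, b') ∈ l → b = b' := by
    intro c
    rw [length_ofList_eq_card, Finset.card_le_one]
    constructor
    · intro h b b' hb hb'
      exact h b (by rw [List.mem_toFinset, hmem]; exact hb)
        b' (by rw [List.mem_toFinset, hmem]; exact hb')
    · intro h b hb b' hb'
      rw [List.mem_toFinset, hmem] at hb hb'
      exact h b b' hb hb'
  constructor
  · intro hall p hp q hq hkey
    have hc : p.1 ∈ PySem.Set.ofList (l.map Prod.fst) := by
      rw [PySem.Set.mem_ofList]; exact List.mem_map_of_mem hp
    have := (hsize p.1).mp (hall p.1 hc) p.2 q.2 (by simpa using hp) (by rw [hkey]; simpa using hq)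
    exact this
  · intro hfun c _
    rw [hsize]
    intro b b' hb hb'
    exact hfun (c, b) hb (c, b') hb' rfl

-- ===== VERDICT (by name: the statement is the Claim_ definition above) =====
theorem can_convert_spec : Claim_equal_can_convert := by
  intro s1 s2 _
  unfold Spec_can_convert can_convert can_convert_alt
  by_cases hs : s1 == s2
  · simp [hs]
  · simp only [hs, Bool.false_eq_true, if_false]
    rw [loop_spec]
    set l := s1.toList.zip s2.toList with hl
    by_cases hfun : Functional l
    · have hA := (okFrom_empty_iff l).mpr hfun
      have hB := (groups_iff l).mpr hfun
      simp [hA, hB]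
    · have hA : okFrom PySem.Dict.empty l = false := by
        rw [Bool.eq_false_iff]; intro h; exact hfun ((okFrom_empty_iff l).mp h)
      have hB : ((PySem.Set.ofList (l.map Prod.fst)).all (fun c =>
          !(decide ((PySem.Set.ofList ((l.filter (fun p => p.1 == c)).map Prod.snd)).length > 1)))) = false := by
        rw [Bool.eq_false_iff]; intro h; exact hfun ((groups_iff l).mp h)
      simp [hA, hB]
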